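-- pv_equiv track=rewrite | github.com/k-harada/AtCoder | other_contests/ICPC2024/B.py | solve
-- ===== SOURCE A (Python) =====
-- def solve(n, a_list, b_list):
--     res = 0
--     flag = 0
--     state_a = 0
--     state_b = 0
--     for a, b in zip(a_list, b_list):
--         state_a += a
--         state_b += b
--         if state_a > state_b:
--             if flag == -1:
--                 res += 1
--             flag = 1
--         elif state_a < state_b:
--             if flag == 1:
--                 res += 1
--             flag = -1
--     return res
-- ===== SOURCE B (Python) =====
-- def solve(n, a_list, b_list):
--     # build the sequence of nonzero signs of the running difference, then
--     # count adjacent sign changes in that sequence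
--     signs = []
--     s = 0
--     for a, b in zip(a_list, b_list):
--         s += a - b
--         if s > 0:
--             signs.append(1)
--         elif s < 0:
--             signs.append(-1)
--     return sum(x != y for x, y in zip(signs, signs[1:]))
-- ===== Notes on version B (the rewrite author's own statement) =====
-- stated objective: simpler
-- what changed: Replaces A's incremental flag/res tracking over two running sums with building the list of nonzero signs of the single running difference and counting adjacent differing signs in it.
import Mathlib
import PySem

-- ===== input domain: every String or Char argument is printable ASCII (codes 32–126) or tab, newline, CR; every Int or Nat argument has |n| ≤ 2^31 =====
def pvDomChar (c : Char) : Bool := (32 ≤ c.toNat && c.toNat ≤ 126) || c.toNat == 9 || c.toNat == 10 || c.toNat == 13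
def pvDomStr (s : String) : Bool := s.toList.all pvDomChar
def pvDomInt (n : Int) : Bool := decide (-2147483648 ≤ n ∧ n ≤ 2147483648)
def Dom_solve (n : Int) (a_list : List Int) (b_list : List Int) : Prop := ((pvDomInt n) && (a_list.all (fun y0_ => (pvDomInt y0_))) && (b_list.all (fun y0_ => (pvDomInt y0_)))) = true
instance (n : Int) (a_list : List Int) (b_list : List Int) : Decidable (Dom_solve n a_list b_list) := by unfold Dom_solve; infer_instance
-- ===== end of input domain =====

-- B replaces A's incremental flag/res tracking with an explicit nonzero-sign
-- sequence of the running difference plus an adjacent-change count (objective: simpler).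

-- ===== PORT A =====
-- state: (res, flag, state_a, state_b)
def solve (n : Int) (a_list : List Int) (b_list : List Int) : Int :=
  ((a_list.zip b_list).foldl
    (fun (st : Int × Int × Int × Int) ab =>
      let res := st.1
      let flag := st.2.1
      let state_a := st.2.2.1 + ab.1
      let state_b := st.2.2.2 + ab.2
      if state_a > state_b then
        ((if flag = -1 then res + 1 else res), 1, state_a, state_b)
      else if state_a < state_b then
        ((if flag = 1 then res + 1 else res), -1, state_a, state_b)
      else
        (res, flag, state_a, state_b))
    (0, 0, 0, 0)).1

-- ===== PORT B =====
-- first fold: state (s, signs); second fold: count adjacent differing signs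
def solve_alt (n : Int) (a_list : List Int) (b_list : List Int) : Int :=
  let signs :=
    ((a_list.zip b_list).foldl
      (fun (st : Int × List Int) ab =>
        let s := st.1 + (ab.1 - ab.2)
        (s, if s > 0 then st.2 ++ [1] else if s < 0 then st.2 ++ [-1] else st.2))
      (0, [])).2
  (signs.zip signs.tail).foldl
    (fun acc xy => acc + (if xy.1 ≠ xy.2 then 1 else 0)) 0

-- ===== PRECONDITION & SPEC =====
def Spec_solve (n : Int) (a_list : List Int) (b_list : List Int) (out : Int) : Prop := out = solve_alt n a_list b_list
instance (n : Int) (a_list : List Int) (b_list : List Int) (out : Int) : Decidable (Spec_solve n a_list b_list out) := by unfold Spec_solve; infer_instance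

-- ===== CLAIM (what is proved, stated in full; the proofs are below) =====
def Claim_equal_solve : Prop := ∀ (n : Int) (a_list : List Int) (b_list : List Int), Dom_solve n a_list b_list → Spec_solve n a_list b_list (solve n a_list b_list)

-- ===== LEMMAS AND PROOFS =====

-- reference recursion for A: count with running difference s and last-sign flag f
def goA : List (Int × Int) → Int → Int → Int
  | [], _, _ => 0
  | ab :: t, s, f =>
      let s' := s + ab.1 - ab.2
      if s' > 0 then (if f = -1 then 1 else 0) + goA t s' 1
      else if s' < 0 then (if f = 1 then 1 else 0) + goA t s' (-1)
      else goA t s' f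

-- the nonzero-sign sequence of the running difference starting at s
def signsOf : List (Int × Int) → Int → List Int
  | [], _ => []
  | ab :: t, s =>
      let s' := s + ab.1 - ab.2
      if s' > 0 then 1 :: signsOf t s'
      else if s' < 0 then (-1) :: signsOf t s'
      else signsOf t s'

-- count changes in a sign list given the previous sign f (0 = no previous)
def ccf : Int → List Int → Int
  | _, [] => 0
  | f, x :: t => (if f ≠ 0 ∧ f ≠ x then 1 else 0) + ccf x t

theorem solveA_fold (l : List (Int × Int)) :
    ∀ (res flag sa sb : Int),
      (l.foldl
        (fun (st : Int × Int × Int × Int) ab =>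
          let res := st.1
          let flag := st.2.1
          let state_a := st.2.2.1 + ab.1
          let state_b := st.2.2.2 + ab.2
          if state_a > state_b then
            ((if flag = -1 then res + 1 else res), 1, state_a, state_b)
          else if state_a < state_b then
            ((if flag = 1 then res + 1 else res), -1, state_a, state_b)
          else
            (res, flag, state_a, state_b))
        (res, flag, sa, sb)).1 = res + goA l (sa - sb) flag := by
  induction l with
  | nil => intro res flag sa sb; simp [goA]
  | cons ab t ih =>
      intro res flag sa sb
      simp only [List.foldl_cons, goA]
      have h1 : sa + ab.1 > sb + ab.2 ↔ sa - sb + ab.1 - ab.2 > 0 := by omega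
      have h2 : sa + ab.1 < sb + ab.2 ↔ sa - sb + ab.1 - ab.2 < 0 := by omega
      by_cases hg : sa + ab.1 > sb + ab.2
      · simp only [hg, if_pos, if_pos (h1.mp hg)]
        rw [ih]
        have : sa + ab.1 - (sb + ab.2) = sa - sb + ab.1 - ab.2 := by ring
        rw [this]
        by_cases hf : flag = -1 <;> simp [hf] <;> ring
      · by_cases hl : sa + ab.1 < sb + ab.2
        · simp only [if_neg hg, if_pos hl, if_neg (by omega : ¬ sa - sb + ab.1 - ab.2 > 0),
            if_pos (h2.mp hl)]
          rw [ih]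
          have : sa + ab.1 - (sb + ab.2) = sa - sb + ab.1 - ab.2 := by ring
          rw [this]
          by_cases hf : flag = 1 <;> simp [hf] <;> ring
        · simp only [if_neg hg, if_neg hl, if_neg (by omega : ¬ sa - sb + ab.1 - ab.2 > 0),
            if_neg (by omega : ¬ sa - sb + ab.1 - ab.2 < 0)]
          rw [ih]
          have : sa + ab.1 - (sb + ab.2) = sa - sb + ab.1 - ab.2 := by ring
          rw [this]

theorem solveB_signs (l : List (Int × Int)) :
    ∀ (s : Int) (acc : List Int),
      (l.foldl
        (fun (st : Int × List Int) ab =>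
          let s := st.1 + (ab.1 - ab.2)
          (s, if s > 0 then st.2 ++ [1] else if s < 0 then st.2 ++ [-1] else st.2))
        (s, acc)).2 = acc ++ signsOf l s := by
  induction l with
  | nil => intro s acc; simp [signsOf]
  | cons ab t ih =>
      intro s acc
      simp only [List.foldl_cons]
      have h : s + (ab.1 - ab.2) = s + ab.1 - ab.2 := by ring
      simp only [signsOf, h]
      by_cases h1 : s + ab.1 - ab.2 > 0
      · rw [if_pos h1, if_pos h1, ih]; simp
      · by_cases h2 : s + ab.1 - ab.2 < 0
        · rw [if_neg h1, if_pos h2, if_neg h1, if_pos h2, ih]; simp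
        · rw [if_neg h1, if_neg h2, if_neg h1, if_neg h2, ih]

theorem signsOf_mem (l : List (Int × Int)) :
    ∀ (s : Int) (x : Int), x ∈ signsOf l s → x = 1 ∨ x = -1 := by
  induction l with
  | nil => intro s x h; simp [signsOf] at h
  | cons ab t ih =>
      intro s x h
      simp only [signsOf] at h
      split_ifs at h with h1 h2
      · rcases List.mem_cons.mp h with h | h
        · left; exact h
        · exact ih _ _ h
      · rcases List.mem_cons.mp h with h | h
        · right; exact h
        · exact ih _ _ h
      · exact ih _ _ h

theorem goA_eq_ccf (l : List (Int × Int)) :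
    ∀ (s f : Int), (f = -1 ∨ f = 0 ∨ f = 1) →
      goA l s f = ccf f (signsOf l s) := by
  induction l with
  | nil => intro s f _; simp [goA, signsOf, ccf]
  | cons ab t ih =>
      intro s f hf
      simp only [goA, signsOf]
      by_cases h1 : s + ab.1 - ab.2 > 0
      · rw [if_pos h1, if_pos h1, ih _ 1 (by omega)]
        simp only [ccf]
        have he : (if f = -1 then (1:Int) else 0) = (if f ≠ 0 ∧ f ≠ 1 then 1 else 0) := by
          rcases hf with hf | hf | hf <;> subst hf <;> norm_num
        rw [he]
      · by_cases h2 : s + ab.1 - ab.2 < 0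
        · rw [if_neg h1, if_pos h2, if_neg h1, if_pos h2, ih _ (-1) (by omega)]
          simp only [ccf]
          have he : (if f = 1 then (1:Int) else 0) = (if f ≠ 0 ∧ f ≠ -1 then 1 else 0) := by
            rcases hf with hf | hf | hf <;> subst hf <;> norm_num
          rw [he]
        · rw [if_neg h1, if_neg h2, if_neg h1, if_neg h2]
          exact ih _ f hf

theorem countfold_eq_ccf (l : List Int) (hl : ∀ x ∈ l, x = 1 ∨ x = -1) :
    ((l.zip l.tail).foldl
      (fun acc xy => acc + (if xy.1 ≠ xy.2 then 1 else 0)) 0) = ccf 0 l := by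
  have key : ∀ (t : List Int) (x a : Int), (x = 1 ∨ x = -1) →
      (∀ y ∈ t, y = 1 ∨ y = -1) →
      (((x :: t).zip t).foldl
        (fun acc xy => acc + (if xy.1 ≠ xy.2 then 1 else 0)) a) = a + ccf x t := by
    intro t
    induction t with
    | nil => intro x a _ _; simp [ccf]
    | cons y t' ih =>
        intro x a hx hmem
        simp only [List.zip_cons_cons, List.foldl_cons]
        rw [ih y _ (hmem y (by simp)) (fun z hz => hmem z (by simp [hz]))]
        simp only [ccf]
        have hx0 : x ≠ 0 := by rcases hx with h | h <;> omega
        by_cases hxy : x = y <;> simp [hxy, hx0] <;> ring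
  cases l with
  | nil => simp [ccf]
  | cons x t =>
      simp only [List.tail_cons]
      rw [key t x 0 (hl x (by simp)) (fun y hy => hl y (by simp [hy]))]
      simp [ccf]

-- ===== VERDICT (by name: the statement is the Claim_ definition above) =====
theorem solve_spec : Claim_equal_solve := by
  intro n a_list b_list _
  unfold Spec_solve solve solve_alt
  rw [solveA_fold, solveB_signs]
  simp only [List.nil_append, Int.zero_add]
  rw [goA_eq_ccf _ _ 0 (by omega),
    countfold_eq_ccf _ (fun x hx => signsOf_mem _ _ x hx)]
  simp
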